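-- pv_equiv track=rewrite | github.com/rainyingwork/ScientificAnalysis | package/common/osbasic/InputCtrl.py | makeParametersData
-- ===== SOURCE A (Python) =====
-- def makeParametersData(argv):
--     parameterArgv = argv
--     parametersData = {}
--     if len(parameterArgv) >= 1:
--         parameterName = None
--         parameterValues = []
--         for parameter in parameterArgv[1:]:
--             if parameter.find("--") == 0:
--                 if parameterName != None:
--                     parametersData[parameterName] = parameterValues
--                 parameterValues = []
--                 parameterName = parameter.replace("--", "")
--             else:
--                 parameterValues.append(parameter)
--         parametersData[parameterName] = parameterValues
--     return parametersData
-- ===== SOURCE B (Python) =====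
-- def _segments(ts):
--     # ts is non-empty and starts with a "--" flag token: yield (name, values) pairs
--     name = ts[0].replace("--", "")
--     vals = []
--     k = 1
--     while k < len(ts) and ts[k].find("--") != 0:
--         vals.append(ts[k])
--         k += 1
--     rest = ts[k:]
--     return [(name, vals)] + (_segments(rest) if rest else [])
--
--
-- def makeParametersData(argv):
--     tokens = argv[1:]
--     while tokens and tokens[0].find("--") != 0:
--         tokens = tokens[1:]
--     return dict(_segments(tokens)) if tokens else {}
-- ===== Notes on version B (the rewrite author's own statement) =====
-- stated objective: alternative
-- what changed: A is a single-pass state machine mutating a dict with running (current-name, current-values) state; B drops the pre-flag lead, recursively cuts the token list into (name, values) segments and builds the dict once with dict(); Pre_ excludes nonempty argv whose tail contains no '--' flag, where A returns a dict keyed by None, which is not a value of the declared str-keyed return type.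
-- outside the precondition, e.g. on makeParametersData(['prog', 'x']): A returns {None: ['x']}, B returns {}
import Mathlib
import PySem

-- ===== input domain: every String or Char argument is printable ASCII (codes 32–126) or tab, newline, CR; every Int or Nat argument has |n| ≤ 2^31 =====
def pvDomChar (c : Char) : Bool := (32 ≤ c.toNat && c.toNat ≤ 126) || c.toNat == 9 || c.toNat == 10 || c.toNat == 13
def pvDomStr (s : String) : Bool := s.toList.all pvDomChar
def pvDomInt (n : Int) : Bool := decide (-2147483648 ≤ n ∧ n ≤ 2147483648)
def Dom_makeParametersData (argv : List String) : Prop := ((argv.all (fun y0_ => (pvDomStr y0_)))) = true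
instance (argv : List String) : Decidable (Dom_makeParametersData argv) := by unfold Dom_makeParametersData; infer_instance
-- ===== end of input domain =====

-- B replaces A's single-pass dict-mutating state machine by a recursive segmentation into
-- (name, values) pairs followed by one dict() construction (alternative decomposition, same cost).


-- ===== PORT A =====
-- the body of A's for-loop (state = (parametersData, parameterName, parameterValues))
def pvStepA (st : PySem.Dict String (List String) × Option String × List String)
    (parameter : String) : PySem.Dict String (List String) × Option String × List String :=
  if PySem.Str.find parameter "--" == 0 then
    let d := match st.2.1 with
      | some n => st.1.insert n st.2.2
      | none => st.1
    (d, some (PySem.Str.replace parameter "--" ""), [])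
  else
    (st.1, st.2.1, st.2.2 ++ [parameter])

def makeParametersData (argv : List String) : List (String × List String) :=
  if argv.length ≥ 1 then
    let st := (argv.drop 1).foldl pvStepA (PySem.Dict.empty, none, [])
    -- final 'parametersData[parameterName] = parameterValues'; when parameterName is still
    -- None, Python inserts key None, which the String-keyed type cannot hold (outside Pre_)
    (match st.2.1 with
      | some n => st.1.insert n st.2.2
      | none => st.1).items
  else []

-- ===== PORT B =====
-- the inner while loop of _segments: values up to the next flag, and the remainder
def pvCollect : List String → List String × List String
  | [] => ([], [])
  | t :: ts =>
      if PySem.Str.find t "--" == 0 then ([], t :: ts)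
      else
        let p := pvCollect ts
        (t :: p.1, p.2)

theorem pvCollect_snd_length_le : ∀ (ts : List String), (pvCollect ts).2.length ≤ ts.length
  | [] => Nat.le_refl _
  | t :: ts => by
      simp only [pvCollect]
      split
      · simp
      · exact Nat.le_succ_of_le (pvCollect_snd_length_le ts)

-- _segments(ts): ts starts with a flag; emit (name, values) pairs recursively
def pvSegments : List String → List (String × List String)
  | [] => []
  | t :: ts =>
      let p := pvCollect ts
      (PySem.Str.replace t "--" "", p.1) :: (if p.2 = [] then [] else pvSegments p.2)
termination_by ts => ts.length
decreasing_by
  exact Nat.lt_succ_of_le (pvCollect_snd_length_le ts)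

-- the 'while tokens and tokens[0].find("--") != 0: tokens = tokens[1:]' loop
def pvDropLead : List String → List String
  | [] => []
  | t :: ts => if PySem.Str.find t "--" == 0 then t :: ts else pvDropLead ts

def makeParametersData_alt (argv : List String) : List (String × List String) :=
  let tokens := pvDropLead (argv.drop 1)
  if tokens ≠ [] then
    ((pvSegments tokens).foldl (fun d p => d.insert p.1 p.2) PySem.Dict.empty).items
  else []

-- ===== PRECONDITION & SPEC =====
-- Pre_ excludes nonempty argv whose tail has no '--'-flag token: there A returns a dict with
-- key None, which is not a value of the declared str-keyed return type.
def Pre_makeParametersData (argv : List String) : Prop :=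
  argv = [] ∨ (argv.drop 1).any (fun t => PySem.Str.find t "--" == 0) = true
instance (argv : List String) : Decidable (Pre_makeParametersData argv) := by
  unfold Pre_makeParametersData; infer_instance

def pvWitness_makeParametersData : List String := ["prog", "--a", "x", "y", "--b", "z"]

def Spec_makeParametersData (argv : List String) (out : List (String × List String)) : Prop := out = makeParametersData_alt argv
instance (argv : List String) (out : List (String × List String)) : Decidable (Spec_makeParametersData argv out) := by unfold Spec_makeParametersData; infer_instance

-- ===== CLAIM (what is proved, stated in full; the proofs are below) =====
def Claim_equal_makeParametersData : Prop := ∀ (argv : List String), Dom_makeParametersData argv → Pre_makeParametersData argv → Spec_makeParametersData argv (makeParametersData argv)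

-- ===== LEMMAS AND PROOFS =====

-- A's final insert, as a function of the loop state
def pvFinishA (st : PySem.Dict String (List String) × Option String × List String) :
    PySem.Dict String (List String) :=
  match st.2.1 with
  | some n => st.1.insert n st.2.2
  | none => st.1

-- main invariant: once the state's name is `some n`, A's remaining loop + final insert
-- performs exactly the inserts of B's segment list
theorem pvMain : ∀ (ts : List String) (d : PySem.Dict String (List String))
    (n : String) (vals : List String),
    pvFinishA (ts.foldl pvStepA (d, some n, vals)) =
      ((n, vals ++ (pvCollect ts).1) ::
        (if (pvCollect ts).2 = [] then [] else pvSegments (pvCollect ts).2)).foldl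
        (fun d p => d.insert p.1 p.2) d
  | [], d, n, vals => by simp [pvCollect, pvFinishA]
  | t :: ts, d, n, vals => by
      by_cases hf : (PySem.Str.find t "--" == 0) = true
      · have ih := pvMain ts (d.insert n vals) (PySem.Str.replace t "--" "") []
        simp only [List.foldl_cons, pvStepA, hf, if_pos, pvCollect, pvSegments] at *
        simpa using ih
      · have ih := pvMain ts d n (vals ++ [t])
        simp only [List.foldl_cons, pvStepA, pvCollect, hf, if_neg, Bool.false_eq_true,
          not_false_iff] at *
        simpa [List.append_assoc] using ih

-- before the first flag, A discards values; the loop reaches the state B starts from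
theorem pvLead : ∀ (ts : List String) (d : PySem.Dict String (List String))
    (vals : List String), ts.any (fun t => PySem.Str.find t "--" == 0) = true →
    ts.foldl pvStepA (d, none, vals) = (pvDropLead ts).foldl pvStepA (d, none, [])
  | t :: ts, d, vals, h => by
      by_cases hf : PySem.Chars.find t.toList ['-', '-'] = 0
      · simp [pvDropLead, hf, pvStepA]
      · have h' : ts.any (fun t => PySem.Str.find t "--" == 0) = true := by
          revert h; simp [hf]
        have hdl : pvDropLead (t :: ts) = pvDropLead ts := by
          simp [pvDropLead, hf]
        have hstep : pvStepA (d, none, vals) t = (d, none, vals ++ [t]) := by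
          simp [pvStepA, hf]
        rw [hdl, List.foldl_cons, hstep]
        exact pvLead ts d (vals ++ [t]) h'

-- a list containing a flag drops its lead to a flag-headed list
theorem pvDropLead_head : ∀ (ts : List String),
    ts.any (fun t => PySem.Str.find t "--" == 0) = true →
    ∃ f r, pvDropLead ts = f :: r ∧ (PySem.Str.find f "--" == 0) = true
  | t :: ts, h => by
      by_cases hf : PySem.Chars.find t.toList ['-', '-'] = 0
      · exact ⟨t, ts, by simp [pvDropLead, hf], by simp [hf]⟩
      · have h' : ts.any (fun t => PySem.Str.find t "--" == 0) = true := by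
          revert h; simp [hf]
        have hdl : pvDropLead (t :: ts) = pvDropLead ts := by
          simp [pvDropLead, hf]
        rw [hdl]; exact pvDropLead_head ts h'

-- ===== VERDICT (by name: the statement is the Claim_ definition above) =====
theorem makeParametersData_spec : Claim_equal_makeParametersData := by
  intro argv _ hpre
  unfold Spec_makeParametersData makeParametersData makeParametersData_alt
  rcases argv with _ | ⟨a, rest⟩
  · simp [pvDropLead]
  · have hflag : rest.any (fun t => PySem.Str.find t "--" == 0) = true := by
      rcases hpre with h | h
      · exact absurd h (by simp)
      · simpa using h
    obtain ⟨f, r, hdl, hf⟩ := pvDropLead_head rest hflag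
    simp only [List.drop_one, List.tail_cons, List.length_cons, hdl, ne_eq,
      reduceCtorEq, not_false_iff, if_pos, ge_iff_le, Nat.le_add_left]
    rw [pvLead rest PySem.Dict.empty [] hflag, hdl]
    have : pvFinishA ((f :: r).foldl pvStepA (PySem.Dict.empty, none, [])) =
        ((pvSegments (f :: r)).foldl (fun d p => d.insert p.1 p.2) PySem.Dict.empty) := by
      simp only [List.foldl_cons, pvStepA, hf, if_pos]
      rw [pvMain r PySem.Dict.empty (PySem.Str.replace f "--" "") []]
      simp [pvSegments]
    rw [← this]
    rfl
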